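-- pv_equiv track=rewrite | github.com/JaredFitz/Advent_Of_Code | calendar_2019.py | find_possible_fuel_passwords
-- ===== SOURCE A (Python) =====
-- def find_possible_fuel_passwords(password_range, difficulty):
--     range_min = min(password_range)
--     range_max = max(password_range)
--     possible_passwords = []
--
--     for i in range(range_min, range_max, 1):
--         # in case the number is 5-digit or less
--         password = str(i).zfill(6)
--         if difficulty == 'SIMPLE':
--             if has_at_least_double_number(password) and never_decreases(password):
--                 possible_passwords.append(password)
--         elif difficulty == 'COMPLEX':
--             if has_double_number(password) and never_decreases(password):
--                 possible_passwords.append(password)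
--
--     return possible_passwords
--
-- def has_at_least_double_number(password):
--     for l in range(1, len(password)):
--         if password[l] == password[l - 1]:
--             return True
--     return False
--
-- def has_double_number(password):
--     current_count = 0
--     current_char = ''
--     summary = []
--     for l in range(0, len(password)):
--         if password[l] == current_char:
--             current_count = current_count + 1
--         else:
--             summary.append(current_count)
--             current_char = password[l]
--             current_count = 1
--
--     summary.append(current_count)
--
--     return 2 in summary
--
-- def never_decreases(password):
--     for l in range(1, len(password)):
--         if int(password[l]) < int(password[l - 1]):
--             return False
--     return True
-- ===== SOURCE B (Python) =====
-- def find_possible_fuel_passwords(password_range, difficulty):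
--     lo = min(password_range)
--     hi = max(password_range)
--     if difficulty not in ('SIMPLE', 'COMPLEX'):
--         return []
--     top = hi - 1
--     if top < 0 or lo > top:
--         return []
--     out = []
--     max_len = max(6, len(str(top)))
--     for length in range(6, max_len + 1):
--         for digits in _nondecreasing(length, 0):
--             if length > 6 and digits[0] == 0:
--                 continue
--             v = 0
--             for d in digits:
--                 v = 10 * v + d
--             if not (lo <= v < hi):
--                 continue
--             if difficulty == 'SIMPLE':
--                 ok = len(set(digits)) < len(digits)
--             else:
--                 ok = 2 in [digits.count(d) for d in set(digits)]
--             if ok: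
--                 out.append(''.join(str(d) for d in digits))
--     return out
--
-- def _nondecreasing(length, low):
--     if length == 0:
--         return [[]]
--     return [[d] + rest for d in range(low, 10) for rest in _nondecreasing(length - 1, d)]
-- ===== Notes on version B (the rewrite author's own statement) =====
-- stated objective: faster
-- what changed: Instead of scanning every integer in [min,max) and string-testing each, B enumerates the non-decreasing digit sequences directly (combinations-with-replacement per length), filters them by range and by a multiset repeat test, and emits them in order.
-- outside the precondition, e.g. on find_possible_fuel_passwords([-123456, -123455], 'SIMPLE'): A returns [], B returns []
import Mathlib
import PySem

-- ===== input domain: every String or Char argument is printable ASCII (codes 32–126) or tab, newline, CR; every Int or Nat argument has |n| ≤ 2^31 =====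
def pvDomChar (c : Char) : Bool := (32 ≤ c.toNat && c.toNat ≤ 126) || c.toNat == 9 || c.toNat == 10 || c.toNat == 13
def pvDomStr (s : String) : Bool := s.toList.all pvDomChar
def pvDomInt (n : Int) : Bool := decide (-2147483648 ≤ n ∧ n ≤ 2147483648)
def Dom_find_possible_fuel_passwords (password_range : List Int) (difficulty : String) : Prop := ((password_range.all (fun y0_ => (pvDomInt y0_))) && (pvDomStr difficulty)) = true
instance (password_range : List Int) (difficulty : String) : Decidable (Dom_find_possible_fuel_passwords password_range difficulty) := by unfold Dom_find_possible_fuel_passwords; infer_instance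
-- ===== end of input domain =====

-- B replaces A's linear scan of the whole integer range by direct enumeration of the
-- non-decreasing digit sequences (combinations with replacement), filtered by range
-- and a repeat test; a timing run measured B faster on large ranges.

-- ===== PORT A =====
-- int(password[l]) on a one-character slice: exact on digit characters; on '-' Python
-- raises ValueError — such inputs are excluded by Pre_, the .getD 0 is never reached there.
def pvIntOfChar (c : Char) : Int := (PySem.Int.ofChars? [c]).getD 0

def pvHasAtLeastDouble (password : List Char) : Bool :=
  (PySem.List.pyRange 1 (password.length : Int) 1).any fun l =>
    PySem.List.pyGetD password l ' ' == PySem.List.pyGetD password (l - 1) ' '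

def pvHasDouble (password : List Char) : Bool :=
  let st := (PySem.List.pyRange 0 (password.length : Int) 1).foldl
    (fun (st : Int × List Char × List Int) l =>
      if [PySem.List.pyGetD password l ' '] == st.2.1 then
        (st.1 + 1, st.2.1, st.2.2)
      else
        (1, [PySem.List.pyGetD password l ' '], st.2.2 ++ [st.1]))
    (0, [], [])
  (st.2.2 ++ [st.1]).contains 2

def pvNeverDecreases (password : List Char) : Bool :=
  !((PySem.List.pyRange 1 (password.length : Int) 1).any fun l =>
      pvIntOfChar (PySem.List.pyGetD password l ' ') < pvIntOfChar (PySem.List.pyGetD password (l - 1) ' '))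

def find_possible_fuel_passwords (password_range : List Int) (difficulty : String) : List String :=
  -- min()/max() of an empty list raise ValueError: excluded by Pre_
  let range_min := (PySem.List.min? password_range id).getD 0
  let range_max := (PySem.List.max? password_range id).getD 0
  (PySem.List.pyRange range_min range_max 1).foldl
    (fun acc i =>
      let password := PySem.Chars.zfill (PySem.Int.toChars i) 6
      if difficulty == "SIMPLE" then
        if pvHasAtLeastDouble password && pvNeverDecreases password then
          acc ++ [String.ofList password] else acc
      else if difficulty == "COMPLEX" then
        if pvHasDouble password && pvNeverDecreases password then
          acc ++ [String.ofList password] else acc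
      else acc) []

-- ===== PORT B =====
-- all non-decreasing digit lists of the given length with digits in [low, 9], in
-- lexicographic (= numeric) order
def pvNondecreasing : Nat → Nat → List (List Nat)
  | 0, _ => [[]]
  | n + 1, low => (List.range' low (10 - low)).flatMap fun d =>
      (pvNondecreasing n d).map (fun rest => d :: rest)

def find_possible_fuel_passwords_alt (password_range : List Int) (difficulty : String) : List String :=
  let lo := (PySem.List.min? password_range id).getD 0
  let hi := (PySem.List.max? password_range id).getD 0
  if !(difficulty == "SIMPLE" || difficulty == "COMPLEX") then []
  else
    let top := hi - 1
    if top < 0 || lo > top then []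
    else
      let maxLen := max 6 (PySem.Int.toChars top).length
      (List.range' 6 (maxLen + 1 - 6)).flatMap fun len =>
        (pvNondecreasing len 0).filterMap fun digits =>
          if len > 6 && digits.headD 0 == 0 then none
          else
            let v : Int := digits.foldl (fun (acc : Int) (d : Nat) => 10 * acc + (d : Int)) 0
            if lo ≤ v ∧ v < hi then
              let ok : Bool :=
                if difficulty == "SIMPLE" then
                  decide ((PySem.Set.ofList digits).length < digits.length)
                else
                  ((PySem.Set.ofList digits).map (fun d => (PySem.List.count digits d : Int))).contains 2
              if ok then some (String.ofList (digits.map Nat.digitChar)) else none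
            else none

-- ===== PRECONDITION & SPEC =====
-- Pre_ excludes the empty list (min() raises ValueError) and, for the difficulties
-- SIMPLE/COMPLEX, lists containing a negative number: str() then yields a '-'-string on
-- which never_decreases raises ValueError for almost all such ranges, and on the few
-- negative ranges where A does return it returns [] just as B does.
def Pre_find_possible_fuel_passwords (password_range : List Int) (difficulty : String) : Prop :=
  password_range ≠ [] ∧
    ((difficulty = "SIMPLE" ∨ difficulty = "COMPLEX") → ∀ x ∈ password_range, 0 ≤ x)
instance (password_range : List Int) (difficulty : String) : Decidable (Pre_find_possible_fuel_passwords password_range difficulty) := by unfold Pre_find_possible_fuel_passwords; infer_instance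

def pvWitness_find_possible_fuel_passwords : List Int × String := ([111122, 111130], "SIMPLE")

def Spec_find_possible_fuel_passwords (password_range : List Int) (difficulty : String) (out : List String) : Prop := out = find_possible_fuel_passwords_alt password_range difficulty
instance (password_range : List Int) (difficulty : String) (out : List String) : Decidable (Spec_find_possible_fuel_passwords password_range difficulty out) := by unfold Spec_find_possible_fuel_passwords; infer_instance

-- ===== CLAIM (what is proved, stated in full; the proofs are below) =====
def Claim_equal_find_possible_fuel_passwords : Prop := ∀ (password_range : List Int) (difficulty : String), Dom_find_possible_fuel_passwords password_range difficulty → Pre_find_possible_fuel_passwords password_range difficulty → Spec_find_possible_fuel_passwords password_range difficulty (find_possible_fuel_passwords password_range difficulty)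

-- ===== LEMMAS AND PROOFS =====

def pvDigits : Nat → List Nat
  | n =>
    if _h : n < 10 then [n]
    else pvDigits (n / 10) ++ [n % 10]
  decreasing_by exact Nat.div_lt_self (by omega) (by omega)

def pvVal (s : List Nat) : Nat := s.foldl (fun a d => 10 * a + d) 0

def pvPad (i : Nat) : List Nat := List.replicate (6 - (pvDigits i).length) 0 ++ pvDigits i

theorem pvVal_append_singleton (s : List Nat) (d : Nat) :
    pvVal (s ++ [d]) = 10 * pvVal s + d := by
  simp [pvVal, List.foldl_append]

theorem pvDigits_ne_nil (n : Nat) : pvDigits n ≠ [] := by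
  rw [pvDigits]; split <;> simp

theorem pvDigits_lt_ten (n : Nat) : ∀ d ∈ pvDigits n, d ≤ 9 := by
  induction n using Nat.strong_induction_on with
  | _ n ih =>
    rw [pvDigits]; split
    · simpa using by omega
    · intro d hd
      rcases List.mem_append.1 hd with h | h
      · exact ih (n / 10) (Nat.div_lt_self (by omega) (by omega)) d h
      · simp at h; omega

theorem pvVal_pvDigits (n : Nat) : pvVal (pvDigits n) = n := by
  induction n using Nat.strong_induction_on with
  | _ n ih =>
    rw [pvDigits]; split
    · simp [pvVal]
    · rw [pvVal_append_singleton, ih (n / 10) (Nat.div_lt_self (by omega) (by omega))]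
      omega

theorem pvDigits_head_ne_zero (n : Nat) (h : n ≠ 0) : (pvDigits n).headD 0 ≠ 0 := by
  induction n using Nat.strong_induction_on with
  | _ n ih =>
    rw [pvDigits]; split
    · simpa using h
    · have h1 := pvDigits_ne_nil (n / 10)
      rcases List.exists_cons_of_ne_nil h1 with ⟨c, t, hct⟩
      rw [hct]
      simpa using by
        have := ih (n / 10) (Nat.div_lt_self (by omega) (by omega)) (by omega)
        rw [hct] at this; simpa using this

theorem pvDigits_length (n : Nat) :
    (pvDigits n).length = if n < 10 then 1 else (pvDigits (n / 10)).length + 1 := by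
  conv_lhs => rw [pvDigits]
  split <;> simp

theorem pvDigits_length_pos (n : Nat) : 1 ≤ (pvDigits n).length :=
  List.length_pos_of_ne_nil (pvDigits_ne_nil n)

theorem pvDigits_length_mono {m n : Nat} (h : m ≤ n) :
    (pvDigits m).length ≤ (pvDigits n).length := by
  induction n using Nat.strong_induction_on generalizing m with
  | _ n ih =>
    rw [pvDigits_length m, pvDigits_length n]
    split
    · split
      · omega
      · omega
    · split
      · omega
      · have : m / 10 ≤ n / 10 := Nat.div_le_div_right h
        have := ih (n / 10) (Nat.div_lt_self (by omega) (by omega)) this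
        omega

theorem pvToDigitsCore_eq (n : Nat) : ∀ (f : Nat) (ds : List Char), n < f →
    Nat.toDigitsCore 10 f n ds = (pvDigits n).map Nat.digitChar ++ ds := by
  induction n using Nat.strong_induction_on with
  | _ n ih =>
    intro f ds hf
    match f with
    | 0 => omega
    | f + 1 =>
      rw [pvDigits]
      simp only [Nat.toDigitsCore]
      split
      · split
        · next h1 h2 => simp [Nat.mod_eq_of_lt h2]
        · next h1 h2 => omega
      · split
        · next h1 h2 => omega
        · next h1 h2 =>
          rw [ih (n / 10) (Nat.div_lt_self (by omega) (by omega)) f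
                (Nat.digitChar (n % 10) :: ds) (by
              have : n / 10 < n := Nat.div_lt_self (by omega) (by omega)
              omega)]
          simp

theorem pvToChars_eq (i : Nat) :
    PySem.Int.toChars (i : Int) = (pvDigits i).map Nat.digitChar := by
  simp only [PySem.Int.toChars]
  rw [if_neg (by omega)]
  simp only [Int.toNat_natCast, Nat.toDigits]
  rw [pvToDigitsCore_eq i (i + 1) [] (by omega)]
  simp

theorem pvDigitChar_ne_sign {d : Nat} (h : d ≤ 9) :
    ¬(Nat.digitChar d = '+' ∨ Nat.digitChar d = '-') := by
  interval_cases d <;> decide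

theorem pvDigitChar_zero : Nat.digitChar 0 = '0' := by decide

theorem pvZfill_eq (i : Nat) :
    PySem.Chars.zfill (PySem.Int.toChars (i : Int)) 6 = (pvPad i).map Nat.digitChar := by
  rw [pvToChars_eq]
  simp only [PySem.Chars.zfill, pvPad]
  have hlen : ((pvDigits i).map Nat.digitChar).length = (pvDigits i).length := by simp
  by_cases h6 : (6 : Int) ≤ ((pvDigits i).map Nat.digitChar).length
  · rw [if_pos h6]
    have : 6 - (pvDigits i).length = 0 := by
      rw [hlen] at h6; omega
    simp [this]
  · rw [if_neg h6]
    rcases List.exists_cons_of_ne_nil (pvDigits_ne_nil i) with ⟨c, t, hct⟩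
    rw [hct]
    simp only [List.map_cons]
    rw [if_neg (by
      apply pvDigitChar_ne_sign
      exact pvDigits_lt_ten i c (by rw [hct]; simp))]
    rw [hlen] at h6
    have : ((6:Int).toNat - ((pvDigits i).map Nat.digitChar).length) = 6 - (pvDigits i).length := by
      simp
    simp only [List.map_append, List.map_replicate, pvDigitChar_zero, ← hct, List.map_cons]
    rw [hct]
    simp

-- === batch 2 ===
theorem pvVal_foldl (s : List Nat) : ∀ (a : Nat),
    s.foldl (fun a d => 10 * a + d) a = a * 10 ^ s.length + pvVal s := by
  induction s with
  | nil => intro a; simp [pvVal]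
  | cons c t ih =>
    intro a
    have h2 : pvVal (c :: t) = c * 10 ^ t.length + pvVal t := by
      rw [pvVal]
      simp only [List.foldl_cons, Nat.mul_zero, Nat.zero_add]
      rw [ih c]
    simp only [List.foldl_cons, List.length_cons]
    rw [ih (10 * a + c), h2]
    ring

theorem pvVal_cons (c : Nat) (t : List Nat) :
    pvVal (c :: t) = c * 10 ^ t.length + pvVal t := by
  rw [pvVal]
  simp only [List.foldl_cons, Nat.mul_zero, Nat.zero_add]
  rw [pvVal_foldl]

theorem pvVal_lt (s : List Nat) (h : ∀ d ∈ s, d ≤ 9) : pvVal s < 10 ^ s.length := by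
  induction s with
  | nil => simp [pvVal]
  | cons c t ih =>
    rw [pvVal_cons]
    have hc : c ≤ 9 := h c (by simp)
    have ht := ih (fun d hd => h d (by simp [hd]))
    have : c * 10 ^ t.length ≤ 9 * 10 ^ t.length := Nat.mul_le_mul_right _ hc
    simp only [List.length_cons, pow_succ]
    omega

theorem pvVal_lower (c : Nat) (t : List Nat) (h : c ≠ 0) :
    10 ^ t.length ≤ pvVal (c :: t) := by
  rw [pvVal_cons]
  have : 1 * 10 ^ t.length ≤ c * 10 ^ t.length := Nat.mul_le_mul_right _ (by omega)
  omega

theorem pvDigits_pvVal : ∀ (s : List Nat), (∀ d ∈ s, d ≤ 9) → s ≠ [] → s.headD 0 ≠ 0 →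
    pvDigits (pvVal s) = s := by
  intro s
  induction s using List.reverseRecOn with
  | nil => intro _ hne _; exact absurd rfl hne
  | append_singleton t d ih =>
    intro h9 _ hh
    have hd : d ≤ 9 := h9 d (by simp)
    rcases t with _ | ⟨x, xs⟩
    · rw [pvVal]
      simp only [List.nil_append, List.foldl_cons, List.foldl_nil, Nat.mul_zero, Nat.zero_add]
      rw [pvDigits, dif_pos (by omega)]
    · have hx : x ≠ 0 := by simpa using hh
      have h9t : ∀ e ∈ x :: xs, e ≤ 9 := fun e he => h9 e (by simp at he ⊢; tauto)
      have hvt : 1 ≤ pvVal (x :: xs) := by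
        have h1 := pvVal_lower x xs hx
        have h2 : 1 ≤ 10 ^ xs.length := Nat.one_le_pow _ _ (by omega)
        omega
      rw [pvVal_append_singleton, pvDigits, dif_neg (by omega)]
      have e1 : (10 * pvVal (x :: xs) + d) / 10 = pvVal (x :: xs) := by omega
      have e2 : (10 * pvVal (x :: xs) + d) % 10 = d := by omega
      rw [e1, e2, ih h9t (by simp) (by simpa using hx)]

theorem pvDigits_length_le {m L : Nat} (hL : 1 ≤ L) (hm : m < 10 ^ L) :
    (pvDigits m).length ≤ L := by
  induction m using Nat.strong_induction_on generalizing L with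
  | _ m ih =>
    rw [pvDigits]
    split
    · simpa using hL
    · next h =>
      have hL2 : 2 ≤ L := by
        by_contra hc
        have : L = 1 := by omega
        subst this
        simp at hm; omega
      have hpow : 10 ^ (L - 1) * 10 = 10 ^ L := by
        rw [← pow_succ]; congr 1; omega
      have hdiv : m / 10 < 10 ^ (L - 1) := by omega
      have := ih (m / 10) (Nat.div_lt_self (by omega) (by omega)) (by omega) hdiv
      simp only [List.length_append, List.length_cons, List.length_nil]
      omega

def pvPadTo (L i : Nat) : List Nat := List.replicate (L - (pvDigits i).length) 0 ++ pvDigits i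

theorem pvPad_eq_pvPadTo (i : Nat) : pvPad i = pvPadTo 6 i := rfl

theorem pvPadTo_pvVal : ∀ (s : List Nat), (∀ d ∈ s, d ≤ 9) → s ≠ [] →
    pvPadTo s.length (pvVal s) = s := by
  intro s
  induction s with
  | nil => intro _ h; exact absurd rfl h
  | cons c t ih =>
    intro h9 _
    have hc : c ≤ 9 := h9 c (by simp)
    have h9t : ∀ e ∈ t, e ≤ 9 := fun e he => h9 e (by simp [he])
    rcases t with _ | ⟨x, xs⟩
    · rw [pvVal]
      simp only [List.foldl_cons, List.foldl_nil, Nat.mul_zero, Nat.zero_add,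
        List.length_cons, List.length_nil]
      rw [pvPadTo, pvDigits, dif_pos (by omega)]
      simp
    · set t := x :: xs with ht
      by_cases hc0 : c = 0
      · subst hc0
        rw [pvVal_cons]
        simp only [Nat.zero_mul, Nat.zero_add]
        have ihh := ih h9t (by simp [ht])
        have hlen : (pvDigits (pvVal t)).length ≤ t.length := by
          apply pvDigits_length_le (by simp [ht])
          exact pvVal_lt t h9t
        rw [pvPadTo] at ihh ⊢
        have hrep : t.length + 1 - (pvDigits (pvVal t)).length
            = (t.length - (pvDigits (pvVal t)).length) + 1 := by omega
        rw [List.length_cons, hrep, List.replicate_succ]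
        simp only [List.cons_append]
        rw [ihh]
      · have hcanon : pvDigits (pvVal (c :: t)) = c :: t :=
          pvDigits_pvVal (c :: t) h9 (by simp) (by simpa using hc0)
        rw [pvPadTo, hcanon]
        simp

theorem pvVal_replicate_zero_append (k : Nat) (s : List Nat) :
    pvVal (List.replicate k 0 ++ s) = pvVal s := by
  induction k with
  | zero => simp
  | succ n ih =>
    rw [List.replicate_succ]
    simpa [pvVal, List.foldl_cons] using ih

theorem pvVal_pvPadTo (L i : Nat) : pvVal (pvPadTo L i) = i := by
  rw [pvPadTo, pvVal_replicate_zero_append, pvVal_pvDigits]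

theorem pvPadTo_length (L i : Nat) :
    (pvPadTo L i).length = max L (pvDigits i).length := by
  simp only [pvPadTo, List.length_append, List.length_replicate]
  have := pvDigits_length_pos i
  rw [Nat.max_def]
  split <;> omega

theorem pvPadTo_mem {L i : Nat} : ∀ d ∈ pvPadTo L i, d ≤ 9 := by
  intro d hd
  rcases List.mem_append.1 hd with h | h
  · simp at h; omega
  · exact pvDigits_lt_ten i d h

theorem pvDigitChar_toNat {d : Nat} (h : d ≤ 9) : (Nat.digitChar d).toNat = 48 + d := by
  interval_cases d <;> decide

theorem pvDigitChar_inj {d e : Nat} (hd : d ≤ 9) (he : e ≤ 9) :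
    Nat.digitChar d = Nat.digitChar e ↔ d = e := by
  constructor
  · intro h
    have := pvDigitChar_toNat hd
    rw [h, pvDigitChar_toNat he] at this
    omega
  · rintro rfl; rfl

theorem pvIntOfChar_digitChar {d : Nat} (h : d ≤ 9) :
    pvIntOfChar (Nat.digitChar d) = (d : Int) := by
  interval_cases d <;> decide

-- === batch 3: never_decreases / has_at_least_double ===
theorem pvGet_map (s : List Nat) (k : Nat) (hk : k < s.length) :
    PySem.List.pyGetD (s.map Nat.digitChar) ((k : Nat) : Int) ' ' = Nat.digitChar s[k] := by
  rw [PySem.List.pyGetD_natCast]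
  rw [List.getD_eq_getElem _ _ (by simpa using hk)]
  simp

theorem pvNeverDecreases_iff (s : List Nat) (h9 : ∀ d ∈ s, d ≤ 9) :
    pvNeverDecreases (s.map Nat.digitChar) = true ↔ s.Pairwise (· ≤ ·) := by
  rw [← List.isChain_iff_pairwise, List.isChain_iff_getElem]
  unfold pvNeverDecreases
  rw [Bool.not_eq_true', List.any_eq_false]
  constructor
  · intro h i hi
    have hmem : ((i + 1 : Nat) : Int) ∈ PySem.List.pyRange 1 ((s.map Nat.digitChar).length : Int) 1 := by
      rw [PySem.List.mem_pyRange_one]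
      constructor
      · omega
      · simp only [List.length_map]; push_cast; omega
    have hcond := h _ hmem
    rw [show ((i + 1 : Nat) : Int) - 1 = ((i : Nat) : Int) by push_cast; ring] at hcond
    rw [pvGet_map s (i+1) (by omega), pvGet_map s i (by omega)] at hcond
    rw [pvIntOfChar_digitChar (h9 _ (by simp)), pvIntOfChar_digitChar (h9 _ (by simp))] at hcond
    simp only [decide_eq_true_eq, not_lt] at hcond
    exact_mod_cast hcond
  · intro h l hl
    rw [PySem.List.mem_pyRange_one] at hl
    simp only [List.length_map] at hl
    obtain ⟨hl1, hl2⟩ := hl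
    have hk : l.toNat < s.length := by omega
    have hk1 : 1 ≤ l.toNat := by omega
    rw [show l = ((l.toNat : Nat) : Int) by omega]
    rw [show ((l.toNat : Nat) : Int) - 1 = ((l.toNat - 1 : Nat) : Int) by omega]
    rw [pvGet_map s l.toNat hk, pvGet_map s (l.toNat - 1) (by omega)]
    rw [pvIntOfChar_digitChar (h9 _ (by simp)), pvIntOfChar_digitChar (h9 _ (by simp))]
    have := h (l.toNat - 1) (by omega)
    simp only [Nat.sub_add_cancel hk1] at this
    simp only [decide_eq_true_eq, not_lt]
    exact_mod_cast this

theorem pvHasAtLeastDouble_iff (s : List Nat) (h9 : ∀ d ∈ s, d ≤ 9)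
    (hs : s.Pairwise (· ≤ ·)) :
    pvHasAtLeastDouble (s.map Nat.digitChar) = true ↔ ¬ s.Nodup := by
  unfold pvHasAtLeastDouble
  constructor
  · rw [List.any_eq_true]
    rintro ⟨l, hl, hb⟩
    rw [PySem.List.mem_pyRange_one] at hl
    simp only [List.length_map] at hl
    obtain ⟨hl1, hl2⟩ := hl
    have hk : l.toNat < s.length := by omega
    have hk1 : 1 ≤ l.toNat := by omega
    rw [show l = ((l.toNat : Nat) : Int) by omega] at hb
    rw [show ((l.toNat : Nat) : Int) - 1 = ((l.toNat - 1 : Nat) : Int) by omega] at hb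
    rw [pvGet_map s l.toNat hk, pvGet_map s (l.toNat - 1) (by omega)] at hb
    rw [beq_iff_eq, pvDigitChar_inj (h9 _ (by simp)) (h9 _ (by simp))] at hb
    intro hnd
    have := (List.Nodup.getElem_inj_iff hnd).1 hb
    omega
  · intro hnd
    by_contra hany
    have hany' := Bool.eq_false_iff.mpr hany
    rw [List.any_eq_false] at hany'
    apply hnd
    have hchain : s.IsChain (· < ·) := by
      rw [List.isChain_iff_getElem]
      intro i hi
      have hle : s[i] ≤ s[i+1] := by
        have h2 := (List.isChain_iff_pairwise).2 hs
        rw [List.isChain_iff_getElem] at h2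
        exact h2 i hi
      have hne : s[i] ≠ s[i+1] := by
        intro heq
        have hmem : ((i + 1 : Nat) : Int) ∈ PySem.List.pyRange 1 ((s.map Nat.digitChar).length : Int) 1 := by
          rw [PySem.List.mem_pyRange_one]
          constructor
          · omega
          · simp only [List.length_map]; push_cast; omega
        have hcond := hany' _ hmem
        rw [show ((i + 1 : Nat) : Int) - 1 = ((i : Nat) : Int) by push_cast; ring] at hcond
        rw [pvGet_map s (i+1) (by omega), pvGet_map s i (by omega)] at hcond
        exact hcond (by rw [heq]; exact beq_self_eq_true _)
      omega
    have h3 := (List.isChain_iff_pairwise).1 hchain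
    exact h3.imp (fun h => Nat.ne_of_lt h)

-- === batch 4: has_double_number (run lengths) ===
def pvCastList (l : List Nat) : List Int := l.map Int.ofNat

theorem pvMem_two_pvCastList (l : List Nat) : (2 : Int) ∈ pvCastList l ↔ 2 ∈ l := by
  rw [pvCastList, List.mem_map]
  constructor
  · rintro ⟨n, hn, he⟩
    have h2 : n = 2 := by
      have : ((n : Nat) : Int) = 2 := he
      exact_mod_cast this
    exact h2 ▸ hn
  · intro h
    exact ⟨2, h, rfl⟩

def pvStepA (st : Int × List Char × List Int) (c : Char) : Int × List Char × List Int :=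
  if [c] == st.2.1 then (st.1 + 1, st.2.1, st.2.2)
  else (1, [c], st.2.2 ++ [st.1])

def pvRuns {α : Type} [BEq α] : List α → List Nat
  | [] => []
  | c :: t => (1 + (t.takeWhile (· == c)).length) :: pvRuns (t.dropWhile (· == c))
  termination_by l => l.length
  decreasing_by
    have := List.length_dropWhile_le (· == c) t
    simp only [List.length_cons]
    omega

theorem pvRuns_nil {α : Type} [BEq α] : pvRuns ([] : List α) = [] := by
  rw [pvRuns.eq_def]

theorem pvRuns_cons {α : Type} [BEq α] (c : α) (t : List α) :
    pvRuns (c :: t) = (1 + (t.takeWhile (· == c)).length) :: pvRuns (t.dropWhile (· == c)) := by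
  rw [pvRuns.eq_def]

theorem pvFoldSummary : ∀ (t : List Char) (c : Char) (k : Int) (summ : List Int),
    (t.foldl pvStepA (k, [c], summ)).2.2 ++ [(t.foldl pvStepA (k, [c], summ)).1]
      = summ ++ [k + ((t.takeWhile (· == c)).length : Int)]
          ++ pvCastList (pvRuns (t.dropWhile (· == c))) := by
  intro t
  induction t with
  | nil => intro c k summ; simp [pvRuns_nil, pvCastList]
  | cons x t' ih =>
    intro c k summ
    by_cases hx : x = c
    · subst hx
      have hstep : pvStepA (k, [x], summ) x = (k + 1, [x], summ) := by
        simp [pvStepA]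
      simp only [List.foldl_cons, hstep]
      rw [ih x (k + 1) summ]
      rw [List.takeWhile_cons_of_pos (by simp), List.dropWhile_cons_of_pos (by simp)]
      simp only [List.length_cons]
      push_cast
      ring_nf
    · have hstep : pvStepA (k, [c], summ) x = (1, [x], summ ++ [k]) := by
        simp [pvStepA, hx]
      simp only [List.foldl_cons, hstep]
      rw [ih x 1 (summ ++ [k])]
      rw [List.takeWhile_cons_of_neg (by simp [hx]), List.dropWhile_cons_of_neg (by simp [hx])]
      rw [pvRuns_cons, pvCastList, pvCastList]
      push_cast
      simp [List.append_assoc]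

theorem pvHasDouble_iff_runs (cs : List Char) :
    pvHasDouble cs = true ↔ 2 ∈ pvRuns cs := by
  unfold pvHasDouble
  rw [PySem.List.foldl_pyRange_zero_pyGetD' cs ' '
    (fun (st : Int × List Char × List Int) c =>
      if [c] == st.2.1 then (st.1 + 1, st.2.1, st.2.2)
      else (1, [c], st.2.2 ++ [st.1])) (0, [], [])]
  rcases cs with _ | ⟨x, t⟩
  · simp [pvRuns_nil]
  · have hstep0 : pvStepA (0, [], []) x = (1, [x], [0]) := by simp [pvStepA]
    have hfold : List.foldl
        (fun (st : Int × List Char × List Int) c =>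
          if [c] == st.2.1 then (st.1 + 1, st.2.1, st.2.2)
          else (1, [c], st.2.2 ++ [st.1])) (0, [], []) (x :: t)
        = t.foldl pvStepA (1, [x], [0]) := by
      simp only [List.foldl_cons]
      rw [show ((if [x] == ([] : List Char) then ((0 : Int) + 1, ([] : List Char), ([] : List Int))
          else (1, [x], [] ++ [0])) : Int × List Char × List Int) = (1, [x], [0]) by simp]
      rfl
    rw [hfold]
    have hsum := pvFoldSummary t x 1 [0]
    simp only [List.contains_eq_mem]
    rw [show ([0] : List Int) ++ [1 + ((t.takeWhile (· == x)).length : Int)]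
          ++ pvCastList (pvRuns (t.dropWhile (· == x)))
        = (0 : Int) :: pvCastList (pvRuns (x :: t)) by
      rw [pvRuns_cons, pvCastList, pvCastList]; push_cast; simp]
      at hsum
    rw [hsum]
    simp only [List.contains_eq_mem, decide_eq_true_eq, List.mem_cons, pvMem_two_pvCastList]
    constructor
    · rintro (h | h)
      · omega
      · exact h
    · intro h
      exact Or.inr h

theorem pvTakeWhile_map_digitChar (c : Nat) (hc : c ≤ 9) :
    ∀ (t : List Nat), (∀ d ∈ t, d ≤ 9) →
      (t.map Nat.digitChar).takeWhile (· == Nat.digitChar c)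
        = (t.takeWhile (· == c)).map Nat.digitChar
      ∧ (t.map Nat.digitChar).dropWhile (· == Nat.digitChar c)
        = (t.dropWhile (· == c)).map Nat.digitChar := by
  intro t
  induction t with
  | nil => intro _; simp
  | cons d t' ih =>
    intro h9
    have hd : d ≤ 9 := h9 d (by simp)
    have ih' := ih (fun e he => h9 e (by simp [he]))
    by_cases hdc : d = c
    · subst hdc
      simp only [List.map_cons]
      rw [List.takeWhile_cons_of_pos (by simp), List.dropWhile_cons_of_pos (by simp),
        List.takeWhile_cons_of_pos (by simp), List.dropWhile_cons_of_pos (by simp)]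
      exact ⟨by rw [List.map_cons, ih'.1], ih'.2⟩
    · have hne : (Nat.digitChar d == Nat.digitChar c) = false := by
        rw [beq_eq_false_iff_ne]
        intro h
        exact hdc ((pvDigitChar_inj hd hc).1 h)
      simp only [List.map_cons]
      rw [List.takeWhile_cons_of_neg (by simp [hne]), List.dropWhile_cons_of_neg (by simp [hne]),
        List.takeWhile_cons_of_neg (by simp [hdc]), List.dropWhile_cons_of_neg (by simp [hdc])]
      simp

theorem pvRuns_map_digitChar : ∀ (s : List Nat), (∀ d ∈ s, d ≤ 9) →
    pvRuns (s.map Nat.digitChar) = pvRuns s := by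
  intro s
  induction hls : s.length using Nat.strong_induction_on generalizing s with
  | _ n ih =>
    rcases s with _ | ⟨c, t⟩
    · simp [pvRuns_nil]
    · intro h9
      have hc : c ≤ 9 := h9 c (by simp)
      have h9t : ∀ d ∈ t, d ≤ 9 := fun e he => h9 e (by simp [he])
      have htw := pvTakeWhile_map_digitChar c hc t h9t
      simp only [List.map_cons]
      rw [pvRuns_cons, pvRuns_cons, htw.1, htw.2]
      have hlen : (t.dropWhile (· == c)).length < n := by
        have := List.length_dropWhile_le (· == c) t
        simp only [← hls, List.length_cons]
        omega
      rw [ih (t.dropWhile (· == c)).length hlen (t.dropWhile (· == c)) rfl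
        (fun e he => h9t e (List.Sublist.mem he (List.dropWhile_sublist _)))]
      simp

-- === batch 5: runs of a sorted list vs counts ===
theorem pvDropWhile_head_false {α : Type} (p : α → Bool) :
    ∀ (t : List α) (e0 : α) (rest : List α), t.dropWhile p = e0 :: rest → p e0 = false := by
  intro t
  induction t with
  | nil => intro e0 rest h; simp at h
  | cons a t ih =>
    intro e0 rest h
    by_cases hp : p a = true
    · rw [List.dropWhile_cons_of_pos hp] at h
      exact ih _ _ h
    · rw [List.dropWhile_cons_of_neg hp] at h
      injection h with h1 h2
      subst h1
      simpa using hp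

theorem pvRuns_two_iff : ∀ (n : Nat) (s : List Nat), s.length = n → s.Pairwise (· ≤ ·) →
    (2 ∈ pvRuns s ↔ ∃ d ∈ s, s.count d = 2) := by
  intro n
  induction n using Nat.strong_induction_on with
  | _ n ih =>
    intro s hls hs
    rcases s with _ | ⟨c, t⟩
    · simp [pvRuns_nil]
    · set tw := t.takeWhile (· == c) with htw
      set dw := t.dropWhile (· == c) with hdw
      have hsplit : tw ++ dw = t := List.takeWhile_append_dropWhile
      have htw_all : ∀ e ∈ tw, e = c := by
        intro e he
        have := List.mem_takeWhile_imp he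
        simpa using this
      have hdw_sub : dw.Sublist t := List.dropWhile_sublist _
      have hdw_pairwise : dw.Pairwise (· ≤ ·) :=
        List.Pairwise.sublist hdw_sub (List.pairwise_cons.1 hs).2
      have hc_le : ∀ e ∈ t, c ≤ e := (List.pairwise_cons.1 hs).1
      have hdw_gt : ∀ e ∈ dw, c < e := by
        intro e he
        rcases hdwe : dw with _ | ⟨e0, rest⟩
        · rw [hdwe] at he; simp at he
        · have he0 : (e0 == c) = false :=
            pvDropWhile_head_false (· == c) t e0 rest (by rw [← hdw]; exact hdwe)
          have he0t : e0 ∈ t := List.Sublist.mem (by rw [hdwe]; simp) hdw_sub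
          have he0c : c < e0 := by
            have h1 := hc_le e0 he0t
            have h2 : e0 ≠ c := by simpa using he0
            omega
          rw [hdwe] at he
          rcases List.mem_cons.1 he with rfl | hrest
          · exact he0c
          · have : e0 ≤ e := by
              have := List.pairwise_cons.1 (hdwe ▸ hdw_pairwise)
              exact this.1 e hrest
            omega
      have hcount_c : (c :: t).count c = 1 + tw.length := by
        rw [List.count_cons_self, ← hsplit, List.count_append]
        have h1 : tw.count c = tw.length := List.count_eq_length.2 (fun b hb => (htw_all b hb).symm)
        have h2 : dw.count c = 0 := List.count_eq_zero.2 (fun hmem => by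
          have := hdw_gt c hmem; omega)
        omega
      have hcount_dw : ∀ d ∈ dw, (c :: t).count d = dw.count d := by
        intro d hd
        have hdc : c < d := hdw_gt d hd
        rw [List.count_cons_of_ne (by omega), ← hsplit, List.count_append]
        have h1 : tw.count d = 0 := List.count_eq_zero.2 (fun hmem => by
          have := htw_all d hmem; omega)
        omega
      have hlen_dw : dw.length < n := by
        have h1 := List.length_dropWhile_le (· == c) t
        rw [← hdw] at h1
        simp only [← hls, List.length_cons]
        omega
      have ihdw := ih dw.length hlen_dw dw rfl hdw_pairwise
      rw [pvRuns_cons, ← htw, ← hdw, List.mem_cons]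
      constructor
      · rintro (h2 | h2)
        · exact ⟨c, by simp, by omega⟩
        · obtain ⟨d, hd, hcnt⟩ := ihdw.1 h2
          exact ⟨d, List.mem_cons_of_mem _ (List.Sublist.mem hd hdw_sub),
            by rw [hcount_dw d hd]; exact hcnt⟩
      · rintro ⟨d, hd, hcnt⟩
        by_cases hdc : d = c
        · subst hdc
          left
          omega
        · right
          rcases List.mem_cons.1 hd with rfl | hdt
          · exact absurd rfl hdc
          · have hddw : d ∈ dw := by
              rcases List.mem_append.1 (by rw [hsplit]; exact hdt : d ∈ tw ++ dw) with h | h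
              · exact absurd (htw_all d h) hdc
              · exact h
            exact ihdw.2 ⟨d, hddw, by rw [← hcount_dw d hddw]; exact hcnt⟩

-- === batch 6: B-side condition lemmas ===
theorem pvSetOfList_length (xs : List Nat) :
    (PySem.Set.ofList xs).length ≤ xs.length ∧
      ((PySem.Set.ofList xs).length = xs.length ↔ xs.Nodup) := by
  induction xs using List.reverseRecOn with
  | nil => simp [PySem.Set.ofList, PySem.Set.empty]
  | append_singleton t x ih =>
    have hfold : PySem.Set.ofList (t ++ [x]) = PySem.Set.add (PySem.Set.ofList t) x := by
      simp [PySem.Set.ofList, List.foldl_append]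
    have hnodup_iff : (t ++ [x]).Nodup ↔ t.Nodup ∧ x ∉ t := by
      rw [List.nodup_append]
      constructor
      · rintro ⟨h1, -, h3⟩
        exact ⟨h1, fun hmem => absurd rfl (h3 x hmem x (by simp))⟩
      · rintro ⟨h1, h2⟩
        refine ⟨h1, by simp, ?_⟩
        intro a ha b hb
        simp only [List.mem_singleton] at hb
        subst hb
        intro he
        exact h2 (he ▸ ha)
    by_cases hx : x ∈ t
    · have hcont : (PySem.Set.ofList t).contains x = true :=
        List.elem_eq_true_of_mem ((PySem.Set.mem_ofList t x).2 hx)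
      rw [hfold, PySem.Set.add, if_pos hcont]
      refine ⟨by simp only [List.length_append, List.length_cons, List.length_nil]; omega, ?_⟩
      constructor
      · intro h
        simp only [List.length_append, List.length_cons, List.length_nil] at h
        omega
      · intro h
        exact absurd hx (hnodup_iff.1 h).2
    · have hcont : ¬ (PySem.Set.ofList t).contains x = true := by
        intro hmem
        exact hx ((PySem.Set.mem_ofList t x).1 (List.mem_of_elem_eq_true hmem))
      rw [hfold, PySem.Set.add, if_neg hcont]
      simp only [List.length_append, List.length_cons, List.length_nil]
      refine ⟨by omega, ?_⟩
      rw [hnodup_iff]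
      constructor
      · intro h
        exact ⟨ih.2.1 (by omega), hx⟩
      · rintro ⟨hnd, -⟩
        have := ih.2.2 hnd
        omega

theorem pvNodup_iff_setlen (xs : List Nat) :
    (PySem.Set.ofList xs).length < xs.length ↔ ¬ xs.Nodup := by
  have h := pvSetOfList_length xs
  constructor
  · intro hlt hnd
    rw [h.2.2 hnd] at hlt
    omega
  · intro hnd
    rcases Nat.lt_or_ge (PySem.Set.ofList xs).length xs.length with h1 | h1
    · exact h1
    · exact absurd (h.2.1 (by omega)) hnd

theorem pvCountTwo_iff (s : List Nat) :
    ((PySem.Set.ofList s).map (fun d => ((PySem.List.count s d : Nat) : Int))).contains 2 = true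
      ↔ ∃ d ∈ s, s.count d = 2 := by
  simp only [List.contains_eq_mem, decide_eq_true_eq, List.mem_map]
  constructor
  · rintro ⟨d, hd, he⟩
    refine ⟨d, (PySem.Set.mem_ofList s d).1 hd, ?_⟩
    have h2 : ((PySem.List.count s d : Nat) : Int) = 2 := he
    rw [PySem.List.count] at h2
    exact_mod_cast h2
  · rintro ⟨d, hd, hc⟩
    refine ⟨d, (PySem.Set.mem_ofList s d).2 hd, ?_⟩
    rw [PySem.List.count]
    exact_mod_cast hc

-- === batch 7: generator lemmas, keys, strict-sorted extensionality ===
theorem pvNondecreasing_mem : ∀ (n low : Nat) (s : List Nat),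
    s ∈ pvNondecreasing n low ↔
      s.length = n ∧ s.Pairwise (· ≤ ·) ∧ ∀ d ∈ s, low ≤ d ∧ d ≤ 9 := by
  intro n
  induction n with
  | zero =>
    intro low s
    simp only [pvNondecreasing, List.mem_singleton]
    constructor
    · rintro rfl; simp
    · rintro ⟨hlen, -, -⟩
      exact List.eq_nil_of_length_eq_zero hlen
  | succ n ih =>
    intro low s
    simp only [pvNondecreasing, List.mem_flatMap, List.mem_map, List.mem_range'_1]
    constructor
    · rintro ⟨d, ⟨hd1, hd2⟩, rest, hrest, rfl⟩
      obtain ⟨hlen, hpw, hbound⟩ := (ih d rest).1 hrest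
      refine ⟨by simp [hlen], ?_, ?_⟩
      · rw [List.pairwise_cons]
        exact ⟨fun e he => (hbound e he).1, hpw⟩
      · intro e he
        rcases List.mem_cons.1 he with rfl | he
        · omega
        · have := hbound e he
          omega
    · rintro ⟨hlen, hpw, hbound⟩
      rcases s with _ | ⟨d, rest⟩
      · simp at hlen
      · have hd := hbound d (by simp)
        refine ⟨d, ⟨hd.1, by omega⟩, rest, ?_, rfl⟩
        apply (ih d rest).2
        refine ⟨by simpa using hlen, (List.pairwise_cons.1 hpw).2, ?_⟩
        intro e he
        exact ⟨(List.pairwise_cons.1 hpw).1 e he, (hbound e (by simp [he])).2⟩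

theorem pvNondecreasing_sorted : ∀ (n low : Nat),
    (pvNondecreasing n low).Pairwise (fun s t => pvVal s < pvVal t) := by
  intro n
  induction n with
  | zero => intro low; simp [pvNondecreasing]
  | succ n ih =>
    intro low
    simp only [pvNondecreasing]
    rw [List.pairwise_flatMap]
    constructor
    · intro d _
      rw [List.pairwise_map]
      refine List.Pairwise.imp_of_mem ?_ (ih d)
      intro a b ha hb hab
      have hla : a.length = n := ((pvNondecreasing_mem n d a).1 ha).1
      have hlb : b.length = n := ((pvNondecreasing_mem n d b).1 hb).1
      rw [pvVal_cons, pvVal_cons, hla, hlb]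
      omega
    · refine List.Pairwise.imp_of_mem ?_ (List.pairwise_lt_range' 1)
      intro d1 d2 _ _ hlt x hx y hy
      simp only [List.mem_map] at hx hy
      obtain ⟨a, ha, rfl⟩ := hx
      obtain ⟨b, hb, rfl⟩ := hy
      obtain ⟨hla, -, hba⟩ := (pvNondecreasing_mem n d1 a).1 ha
      obtain ⟨hlb, -, -⟩ := (pvNondecreasing_mem n d2 b).1 hb
      have hva : pvVal a < 10 ^ n := by
        have := pvVal_lt a (fun e he => (hba e he).2)
        rw [hla] at this; exact this
      rw [pvVal_cons, pvVal_cons, hla, hlb]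
      have h1 : d1 * 10 ^ n + pvVal a < (d1 + 1) * 10 ^ n := by
        have : (d1 + 1) * 10 ^ n = d1 * 10 ^ n + 10 ^ n := by ring
        omega
      have h2 : (d1 + 1) * 10 ^ n ≤ d2 * 10 ^ n := Nat.mul_le_mul_right _ (by omega)
      omega

theorem pvStrictExt {α : Type} (f : α → Nat) : ∀ (l1 l2 : List α),
    l1.Pairwise (fun a b => f a < f b) → l2.Pairwise (fun a b => f a < f b) →
    (∀ x, x ∈ l1 ↔ x ∈ l2) → l1 = l2 := by
  intro l1
  induction l1 with
  | nil =>
    intro l2 _ _ hmem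
    rcases l2 with _ | ⟨b, t2⟩
    · rfl
    · exact absurd ((hmem b).2 (by simp)) (by simp)
  | cons a t1 ih =>
    intro l2 h1 h2 hmem
    rcases l2 with _ | ⟨b, t2⟩
    · exact absurd ((hmem a).1 (by simp)) (by simp)
    · have hab : a = b := by
        by_contra hne
        have ha2 : a ∈ b :: t2 := (hmem a).1 (by simp)
        have hb1 : b ∈ a :: t1 := (hmem b).2 (by simp)
        have hfa : f b < f a := by
          rcases List.mem_cons.1 ha2 with h | h
          · exact absurd h hne
          · exact (List.pairwise_cons.1 h2).1 a h
        have hfb : f a < f b := by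
          rcases List.mem_cons.1 hb1 with h | h
          · exact absurd h (fun he => hne he.symm)
          · exact (List.pairwise_cons.1 h1).1 b h
        omega
      subst hab
      have hmem' : ∀ x, x ∈ t1 ↔ x ∈ t2 := by
        intro x
        constructor
        · intro hx
          have hfx : f a < f x := (List.pairwise_cons.1 h1).1 x hx
          rcases List.mem_cons.1 ((hmem x).1 (List.mem_cons_of_mem _ hx)) with rfl | h
          · omega
          · exact h
        · intro hx
          have hfx : f a < f x := (List.pairwise_cons.1 h2).1 x hx
          rcases List.mem_cons.1 ((hmem x).2 (List.mem_cons_of_mem _ hx)) with rfl | h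
          · omega
          · exact h
      rw [ih t2 (List.pairwise_cons.1 h1).2 (List.pairwise_cons.1 h2).2 hmem']

def pvKey (str : String) : Nat := pvVal (str.toList.map (fun c => c.toNat - 48))

theorem pvKey_strOf (s : List Nat) (h9 : ∀ d ∈ s, d ≤ 9) :
    pvKey (String.ofList (s.map Nat.digitChar)) = pvVal s := by
  rw [pvKey, String.toList_ofList, List.map_map]
  congr 1
  conv_rhs => rw [← List.map_id s]
  apply List.map_congr_left
  intro d hd
  simp only [Function.comp_apply, id_eq]
  rw [pvDigitChar_toNat (h9 d hd)]
  omega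

theorem pvValInt (s : List Nat) : ∀ (a0 : Nat),
    s.foldl (fun (acc : Int) (d : Nat) => 10 * acc + (d : Int)) ((a0 : Nat) : Int)
      = ((s.foldl (fun x d => 10 * x + d) a0 : Nat) : Int) := by
  induction s with
  | nil => intro a0; simp
  | cons c t ih =>
    intro a0
    simp only [List.foldl_cons]
    rw [show (10 * ((a0 : Nat) : Int) + (c : Int)) = ((10 * a0 + c : Nat) : Int) by push_cast; ring]
    rw [ih (10 * a0 + c)]

theorem pvValInt_zero (s : List Nat) :
    s.foldl (fun (acc : Int) (d : Nat) => 10 * acc + (d : Int)) 0 = ((pvVal s : Nat) : Int) := by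
  have := pvValInt s 0
  simpa [pvVal] using this

-- === batch 8: canonical length bridges ===
theorem pvPadTo6_of_canon (s : List Nat) (h9 : ∀ d ∈ s, d ≤ 9)
    (hlen : s.length = max 6 (pvDigits (pvVal s)).length) :
    pvPadTo 6 (pvVal s) = s := by
  have hne : s ≠ [] := by
    intro h
    rw [h] at hlen
    simp at hlen
    omega
  have h1 : pvPadTo 6 (pvVal s) = pvPadTo s.length (pvVal s) := by
    rw [pvPadTo, pvPadTo]
    have : 6 - (pvDigits (pvVal s)).length = s.length - (pvDigits (pvVal s)).length := by
      rw [Nat.max_def] at hlen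
      split at hlen <;> omega
    rw [this]
  rw [h1]
  exact pvPadTo_pvVal s h9 hne

theorem pvCanon_digits (s : List Nat) (h9 : ∀ d ∈ s, d ≤ 9)
    (hne : s ≠ []) (hdl : (pvDigits (pvVal s)).length = s.length) :
    pvDigits (pvVal s) = s := by
  have := pvPadTo_pvVal s h9 hne
  rw [pvPadTo, hdl, Nat.sub_self] at this
  simpa using this

theorem pvGen_canon_len (s : List Nat) (h9 : ∀ d ∈ s, d ≤ 9)
    (h6 : 6 ≤ s.length) (hhead : 6 < s.length → s.headD 0 ≠ 0) :
    s.length = max 6 (pvDigits (pvVal s)).length := by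
  have hne : s ≠ [] := by intro h; rw [h] at h6; simp at h6
  have hdle : (pvDigits (pvVal s)).length ≤ s.length :=
    pvDigits_length_le (by omega) (pvVal_lt s h9)
  rcases Nat.lt_or_ge 6 s.length with hgt | hle
  · -- length > 6 : no leading zero, so the digits are exactly s
    have hh := hhead hgt
    have : pvDigits (pvVal s) = s := pvDigits_pvVal s h9 hne hh
    rw [this]
    omega
  · -- length = 6
    have : s.length = 6 := by omega
    rw [Nat.max_def]
    split <;> omega

theorem pvCanon_head_ne (s : List Nat) (h9 : ∀ d ∈ s, d ≤ 9)
    (hlen : s.length = max 6 (pvDigits (pvVal s)).length) (hgt : 6 < s.length) :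
    s.headD 0 ≠ 0 := by
  have hne : s ≠ [] := by intro h; rw [h] at hgt; simp at hgt
  have hdl : (pvDigits (pvVal s)).length = s.length := by
    rw [Nat.max_def] at hlen
    split at hlen <;> omega
  have hds : pvDigits (pvVal s) = s := pvCanon_digits s h9 hne hdl
  have hv0 : pvVal s ≠ 0 := by
    intro h0
    rw [h0] at hds
    rw [show pvDigits 0 = [0] from by rw [pvDigits]; simp] at hds
    rw [← hds] at hgt
    simp at hgt
  rw [← hds]
  exact pvDigits_head_ne_zero _ hv0

theorem pvPw_eq (i : Int) (h : 0 ≤ i) :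
    PySem.Chars.zfill (PySem.Int.toChars i) 6 = (pvPadTo 6 i.toNat).map Nat.digitChar := by
  conv_lhs => rw [show i = ((i.toNat : Nat) : Int) by omega]
  rw [pvZfill_eq, pvPad_eq_pvPadTo]

-- === batch 9: the core list equality ===
theorem pvTopLen (hi : Int) (h : 1 ≤ hi) :
    (PySem.Int.toChars (hi - 1)).length = (pvDigits (hi - 1).toNat).length := by
  conv_lhs => rw [show hi - 1 = (((hi - 1).toNat : Nat) : Int) by omega]
  rw [pvToChars_eq]
  simp

theorem pvCore (lo hi : Int) (hlo : 0 ≤ lo) (hlohi : lo < hi)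
    (C : List Nat → Prop)
    (testA : List Char → Bool)
    (hA : ∀ s : List Nat, (∀ d ∈ s, d ≤ 9) →
        (testA (s.map Nat.digitChar) = true ↔ s.Pairwise (· ≤ ·) ∧ C s))
    (okB : List Nat → Bool)
    (hB : ∀ s : List Nat, (∀ d ∈ s, d ≤ 9) → s.Pairwise (· ≤ ·) → (okB s = true ↔ C s)) :
    ((PySem.List.pyRange lo hi 1).filter
        (fun i => testA (PySem.Chars.zfill (PySem.Int.toChars i) 6))).map
      (fun i => String.ofList (PySem.Chars.zfill (PySem.Int.toChars i) 6))
    = (List.range' 6 (max 6 (PySem.Int.toChars (hi - 1)).length + 1 - 6)).flatMap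
        (fun len => (pvNondecreasing len 0).filterMap (fun digits =>
          if len > 6 && digits.headD 0 == 0 then none
          else if lo ≤ digits.foldl (fun (acc : Int) (d : Nat) => 10 * acc + (d : Int)) 0
                 ∧ digits.foldl (fun (acc : Int) (d : Nat) => 10 * acc + (d : Int)) 0 < hi then
            (if okB digits then some (String.ofList (digits.map Nat.digitChar)) else none)
          else none)) := by
  have hhi1 : 1 ≤ hi := by omega
  have htoplen := pvTopLen hi hhi1
  -- characterisation of the filterMap function
  have hfn : ∀ (len : Nat) (digits : List Nat) (x : String),
      ((if len > 6 && digits.headD 0 == 0 then none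
        else if lo ≤ digits.foldl (fun (acc : Int) (d : Nat) => 10 * acc + (d : Int)) 0
               ∧ digits.foldl (fun (acc : Int) (d : Nat) => 10 * acc + (d : Int)) 0 < hi then
          (if okB digits then some (String.ofList (digits.map Nat.digitChar)) else none)
        else none) = some x)
      ↔ (¬(len > 6 ∧ digits.headD 0 = 0) ∧ lo ≤ ((pvVal digits : Nat) : Int)
          ∧ ((pvVal digits : Nat) : Int) < hi ∧ okB digits = true
          ∧ x = String.ofList (digits.map Nat.digitChar)) := by
    intro len digits x
    simp only [pvValInt_zero]
    split_ifs with h1 h2 h3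
    · simp only [Bool.and_eq_true, decide_eq_true_eq, beq_iff_eq] at h1
      constructor
      · intro h; exact absurd h (by simp)
      · rintro ⟨hg, -⟩; exact absurd ⟨h1.1, h1.2⟩ hg
    · simp only [Bool.and_eq_true, decide_eq_true_eq, beq_iff_eq, not_and] at h1
      constructor
      · intro h
        have hx := Option.some.inj h
        exact ⟨by intro hc; exact (h1 hc.1) hc.2, h2.1, h2.2, h3, hx.symm⟩
      · rintro ⟨-, -, -, -, rfl⟩; rfl
    · simp only [Bool.and_eq_true, decide_eq_true_eq, beq_iff_eq, not_and] at h1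
      constructor
      · intro h; exact absurd h (by simp)
      · rintro ⟨-, -, -, hok, -⟩; exact absurd hok h3
    · simp only [Bool.and_eq_true, decide_eq_true_eq, beq_iff_eq, not_and] at h1
      constructor
      · intro h; exact absurd h (by simp)
      · rintro ⟨-, hv1, hv2, -, -⟩; exact absurd ⟨hv1, hv2⟩ h2
  apply pvStrictExt pvKey
  · -- left side strictly increasing
    rw [List.pairwise_map]
    refine List.Pairwise.imp_of_mem ?_
      (List.Pairwise.filter _ (PySem.List.pairwise_lt_pyRange_one lo hi))
    intro i j hi2 hj2 hij
    have hi0 : 0 ≤ i := by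
      have := (PySem.List.mem_pyRange_one.1 (List.mem_filter.1 hi2).1).1
      omega
    have hj0 : 0 ≤ j := by
      have := (PySem.List.mem_pyRange_one.1 (List.mem_filter.1 hj2).1).1
      omega
    rw [pvPw_eq i hi0, pvPw_eq j hj0, pvKey_strOf _ pvPadTo_mem,
      pvKey_strOf _ pvPadTo_mem, pvVal_pvPadTo, pvVal_pvPadTo]
    omega
  · -- right side strictly increasing
    rw [List.pairwise_flatMap]
    constructor
    · intro len _
      rw [List.pairwise_filterMap]
      refine List.Pairwise.imp_of_mem ?_ (pvNondecreasing_sorted len 0)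
      intro a b ha hb hab x hx y hy
      obtain ⟨-, -, -, -, rfl⟩ := (hfn len a x).1 hx
      obtain ⟨-, -, -, -, rfl⟩ := (hfn len b y).1 hy
      obtain ⟨-, -, hba⟩ := (pvNondecreasing_mem len 0 a).1 ha
      obtain ⟨-, -, hbb⟩ := (pvNondecreasing_mem len 0 b).1 hb
      rw [pvKey_strOf _ (fun d hd => (hba d hd).2), pvKey_strOf _ (fun d hd => (hbb d hd).2)]
      exact hab
    · refine List.Pairwise.imp_of_mem ?_ (List.pairwise_lt_range' 1)
      intro L1 L2 hL1 hL2 hlt x hx y hy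
      rw [List.mem_filterMap] at hx hy
      obtain ⟨a, ha, hfa⟩ := hx
      obtain ⟨b, hb, hfb⟩ := hy
      obtain ⟨-, -, -, -, rfl⟩ := (hfn L1 a x).1 hfa
      obtain ⟨hgb, -, -, -, rfl⟩ := (hfn L2 b y).1 hfb
      obtain ⟨hla, -, hba⟩ := (pvNondecreasing_mem L1 0 a).1 ha
      obtain ⟨hlb, -, hbb⟩ := (pvNondecreasing_mem L2 0 b).1 hb
      rw [List.mem_range'_1] at hL1 hL2
      rw [pvKey_strOf _ (fun d hd => (hba d hd).2), pvKey_strOf _ (fun d hd => (hbb d hd).2)]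
      have hva : pvVal a < 10 ^ L1 := by
        have := pvVal_lt a (fun d hd => (hba d hd).2)
        rw [hla] at this; exact this
      have hL2gt : 6 < L2 := by omega
      have hbne : b ≠ [] := by
        intro h; rw [h] at hlb; simp at hlb; omega
      rcases b with _ | ⟨b0, bt⟩
      · exact absurd rfl hbne
      · have hb0 : b0 ≠ 0 := by
          intro h0
          exact (hgb ⟨hL2gt, by simp [h0]⟩)
        have hvb : 10 ^ bt.length ≤ pvVal (b0 :: bt) := pvVal_lower b0 bt hb0
        have hbtlen : bt.length = L2 - 1 := by
          simp only [List.length_cons] at hlb; omega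
        have hpow : 10 ^ L1 ≤ 10 ^ bt.length := by
          apply Nat.pow_le_pow_right (by omega)
          omega
        omega
  · -- membership
    intro x
    rw [List.mem_map, List.mem_flatMap]
    constructor
    · rintro ⟨i, hi_mem, rfl⟩
      rw [List.mem_filter] at hi_mem
      obtain ⟨hir, htest⟩ := hi_mem
      rw [PySem.List.mem_pyRange_one] at hir
      have hi0 : 0 ≤ i := by omega
      have h9s := @pvPadTo_mem 6 i.toNat
      have hvs : pvVal (pvPadTo 6 i.toNat) = i.toNat := pvVal_pvPadTo 6 i.toNat
      have hlens : (pvPadTo 6 i.toNat).length = max 6 (pvDigits i.toNat).length :=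
        pvPadTo_length 6 i.toNat
      rw [pvPw_eq i hi0] at htest
      obtain ⟨hpw, hC⟩ := (hA _ h9s).1 htest
      refine ⟨(pvPadTo 6 i.toNat).length, ?_, ?_⟩
      · rw [List.mem_range'_1]
        have hmono : (pvDigits i.toNat).length ≤ (pvDigits (hi - 1).toNat).length :=
          pvDigits_length_mono (by omega)
        rw [htoplen, hlens]
        omega
      · rw [List.mem_filterMap]
        refine ⟨pvPadTo 6 i.toNat, ?_, ?_⟩
        · rw [pvNondecreasing_mem]
          exact ⟨rfl, hpw, fun d hd => ⟨Nat.zero_le _, h9s d hd⟩⟩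
        · rw [hfn]
          refine ⟨?_, ?_, ?_, ?_, ?_⟩
          · rintro ⟨hgt, hh0⟩
            exact pvCanon_head_ne _ h9s (by rw [hvs]; exact hlens) hgt hh0
          · rw [hvs]; omega
          · rw [hvs]; omega
          · exact (hB _ h9s hpw).2 hC
          · rw [pvPw_eq i hi0]
    · rintro ⟨len, hlen_mem, hx⟩
      rw [List.mem_filterMap] at hx
      obtain ⟨s, hs_gen, hfs⟩ := hx
      rw [hfn] at hfs
      obtain ⟨hguard, hv1, hv2, hok, rfl⟩ := hfs
      obtain ⟨hsl, hpw, hbound⟩ := (pvNondecreasing_mem len 0 s).1 hs_gen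
      have h9s : ∀ d ∈ s, d ≤ 9 := fun d hd => (hbound d hd).2
      rw [List.mem_range'_1] at hlen_mem
      have h6 : 6 ≤ s.length := by omega
      have hcanon : s.length = max 6 (pvDigits (pvVal s)).length :=
        pvGen_canon_len s h9s h6 (fun hgt => by
          intro hh0
          exact hguard ⟨by omega, hh0⟩)
      have hC : C s := (hB _ h9s hpw).1 hok
      refine ⟨((pvVal s : Nat) : Int), ?_, ?_⟩
      · rw [List.mem_filter]
        constructor
        · rw [PySem.List.mem_pyRange_one]
          exact ⟨hv1, hv2⟩
        · rw [pvPw_eq _ (by omega), Int.toNat_natCast, pvPadTo6_of_canon s h9s hcanon]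
          exact (hA _ h9s).2 ⟨hpw, hC⟩
      · rw [pvPw_eq _ (by omega), Int.toNat_natCast, pvPadTo6_of_canon s h9s hcanon]

theorem pv_main (password_range : List Int) (difficulty : String)
    (hne : password_range ≠ [])
    (hnn : (difficulty = "SIMPLE" ∨ difficulty = "COMPLEX") → ∀ x ∈ password_range, 0 ≤ x) :
    find_possible_fuel_passwords password_range difficulty
      = find_possible_fuel_passwords_alt password_range difficulty := by
  obtain ⟨mn, hmn⟩ : ∃ m, PySem.List.min? password_range id = some m := by
    rcases h : PySem.List.min? password_range id with _ | m
    · exact absurd ((PySem.List.min?_eq_none_iff password_range id).1 h) hne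
    · exact ⟨m, rfl⟩
  obtain ⟨mx, hmx⟩ : ∃ m, PySem.List.max? password_range id = some m := by
    rcases h : PySem.List.max? password_range id with _ | m
    · exact absurd ((PySem.List.max?_eq_none_iff password_range id).1 h) hne
    · exact ⟨m, rfl⟩
  have hmn_mem : mn ∈ password_range := PySem.List.min?_mem hmn
  have hmx_mem : mx ∈ password_range := PySem.List.max?_mem hmx
  have hmnmx : mn ≤ mx := by
    have := PySem.List.max?_isMax hmx mn hmn_mem
    simpa using this
  unfold find_possible_fuel_passwords find_possible_fuel_passwords_alt
  rw [hmn, hmx]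
  simp only [Option.getD_some]
  by_cases hds : difficulty = "SIMPLE"
  · subst hds
    have h0 : ∀ x ∈ password_range, 0 ≤ x := hnn (Or.inl rfl)
    have hmn0 : 0 ≤ mn := h0 mn hmn_mem
    have hmx0 : 0 ≤ mx := h0 mx hmx_mem
    simp only [beq_self_eq_true, if_true, Bool.or_self, Bool.true_or, Bool.not_true,
      Bool.false_eq_true, if_false, reduceIte]
    by_cases hlt : mn < mx
    · rw [if_neg (by simp; omega)]
      rw [PySem.List.foldl_append_if
        (fun i => pvHasAtLeastDouble (PySem.Chars.zfill (PySem.Int.toChars i) 6)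
          && pvNeverDecreases (PySem.Chars.zfill (PySem.Int.toChars i) 6))
        (fun i => String.ofList (PySem.Chars.zfill (PySem.Int.toChars i) 6))
        (PySem.List.pyRange mn mx 1) []]
      rw [List.nil_append]
      exact pvCore mn mx hmn0 hlt (fun s => ¬ s.Nodup)
        (fun cs => pvHasAtLeastDouble cs && pvNeverDecreases cs)
        (fun s h9 => by
          rw [Bool.and_eq_true, pvNeverDecreases_iff s h9]
          constructor
          · rintro ⟨h1, h2⟩
            exact ⟨h2, (pvHasAtLeastDouble_iff s h9 h2).1 h1⟩
          · rintro ⟨h1, h2⟩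
            exact ⟨(pvHasAtLeastDouble_iff s h9 h1).2 h2, h1⟩)
        (fun digits => decide ((PySem.Set.ofList digits).length < digits.length))
        (fun s _ _ => by rw [decide_eq_true_eq, pvNodup_iff_setlen])
    · rw [if_pos (by simp; omega), PySem.List.pyRange_one_eq_nil (by omega)]
      simp
  · by_cases hdc : difficulty = "COMPLEX"
    · subst hdc
      have h0 : ∀ x ∈ password_range, 0 ≤ x := hnn (Or.inr rfl)
      have hmn0 : 0 ≤ mn := h0 mn hmn_mem
      have hmx0 : 0 ≤ mx := h0 mx hmx_mem
      simp only [show (("COMPLEX" == "SIMPLE") = false) from by decide, beq_self_eq_true,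
        if_true, Bool.false_eq_true, if_false, Bool.false_or, Bool.or_true, Bool.not_true,
        reduceIte]
      by_cases hlt : mn < mx
      · rw [if_neg (by simp; omega)]
        rw [PySem.List.foldl_append_if
          (fun i => pvHasDouble (PySem.Chars.zfill (PySem.Int.toChars i) 6)
            && pvNeverDecreases (PySem.Chars.zfill (PySem.Int.toChars i) 6))
          (fun i => String.ofList (PySem.Chars.zfill (PySem.Int.toChars i) 6))
          (PySem.List.pyRange mn mx 1) []]
        rw [List.nil_append]
        exact pvCore mn mx hmn0 hlt (fun s => ∃ d ∈ s, s.count d = 2)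
          (fun cs => pvHasDouble cs && pvNeverDecreases cs)
          (fun s h9 => by
            rw [Bool.and_eq_true, pvNeverDecreases_iff s h9, pvHasDouble_iff_runs,
              pvRuns_map_digitChar s h9]
            constructor
            · rintro ⟨h1, h2⟩
              exact ⟨h2, (pvRuns_two_iff s.length s rfl h2).1 h1⟩
            · rintro ⟨h1, h2⟩
              exact ⟨(pvRuns_two_iff s.length s rfl h1).2 h2, h1⟩)
          (fun digits =>
            ((PySem.Set.ofList digits).map (fun d => (PySem.List.count digits d : Int))).contains 2)
          (fun s _ _ => pvCountTwo_iff s)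
      · rw [if_pos (by simp; omega), PySem.List.pyRange_one_eq_nil (by omega)]
        simp
    · have hb1 : (difficulty == "SIMPLE") = false := beq_eq_false_iff_ne.2 hds
      have hb2 : (difficulty == "COMPLEX") = false := beq_eq_false_iff_ne.2 hdc
      simp only [hb1, hb2, Bool.false_eq_true, if_false, Bool.or_self, Bool.not_false, if_true,
        reduceIte]
      rw [List.foldl_fixed]

-- ===== VERDICT (by name: the statement is the Claim_ definition above) =====
theorem find_possible_fuel_passwords_spec : Claim_equal_find_possible_fuel_passwords := by
  intro password_range difficulty _hdom hpre
  unfold Spec_find_possible_fuel_passwords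
  exact pv_main password_range difficulty hpre.1 hpre.2
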